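-- pv_equiv track=rewrite | github.com/mauricew/advent-of-code-2018 | day_2/main.py | words_similar
-- ===== SOURCE A (Python) =====
-- def words_similar(first_word, second_word):
--     diff_count = 0
--     best_word_one = None
--     best_word_two = None
--     intersection = []
--
--     for i in range(len(first_word)):
--         if first_word[i] != second_word[i]:
--             diff_count = diff_count + 1
--         else:
--             intersection.append(first_word[i])
--     if diff_count != 1:
--         return None
--     return "".join(intersection)
-- ===== SOURCE B (Python) =====
-- def words_similar(first_word, second_word):
--     diffs = [i for i in range(len(first_word)) if first_word[i] != second_word[i]]
--     if len(diffs) != 1: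
--         return None
--     d = diffs[0]
--     return first_word[:d] + first_word[d+1:]
-- ===== Notes on version B (the rewrite author's own statement) =====
-- stated objective: simpler
-- what changed: B collects the mismatch positions and, when there is exactly one, builds the answer by slicing first_word around it, instead of accumulating the matching characters during the scan and joining them.
import Mathlib
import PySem

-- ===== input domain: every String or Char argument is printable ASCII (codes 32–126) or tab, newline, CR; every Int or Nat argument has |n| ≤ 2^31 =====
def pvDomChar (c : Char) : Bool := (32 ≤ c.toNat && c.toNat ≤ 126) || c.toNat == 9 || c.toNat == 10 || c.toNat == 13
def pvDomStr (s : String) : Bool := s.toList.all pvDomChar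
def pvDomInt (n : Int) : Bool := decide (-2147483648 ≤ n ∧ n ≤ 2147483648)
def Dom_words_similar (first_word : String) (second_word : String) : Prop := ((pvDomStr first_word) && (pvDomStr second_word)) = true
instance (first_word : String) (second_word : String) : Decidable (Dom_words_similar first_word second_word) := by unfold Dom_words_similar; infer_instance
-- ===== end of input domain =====

-- B returns the same values but by a different construction: it records the mismatch
-- positions and slices first_word around the unique one, instead of accumulating the
-- matching characters and joining them (objective: simpler).

-- ===== PORT A =====
def words_similar (first_word : String) (second_word : String) : Option String :=
  let fl := first_word.toList
  let sl := second_word.toList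
  -- for i in range(len(first_word)): if first_word[i] != second_word[i]: diff_count += 1 else: intersection.append(first_word[i])
  let st := (PySem.List.pyRange 0 (fl.length : Int) 1).foldl
    (fun (acc : Int × List Char) i =>
      if PySem.List.pyGetD fl i ' ' != PySem.List.pyGetD sl i ' ' then (acc.1 + 1, acc.2)
      else (acc.1, acc.2 ++ [PySem.List.pyGetD fl i ' '])) ((0 : Int), ([] : List Char))
  if st.1 ≠ 1 then none else some (String.ofList st.2)

-- ===== PORT B =====
def words_similar_alt (first_word : String) (second_word : String) : Option String :=
  let fl := first_word.toList
  let sl := second_word.toList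
  -- diffs = [i for i in range(len(first_word)) if first_word[i] != second_word[i]]
  let diffs := (PySem.List.pyRange 0 (fl.length : Int) 1).filter
    (fun i => PySem.List.pyGetD fl i ' ' != PySem.List.pyGetD sl i ' ')
  if diffs.length ≠ 1 then none
  else
    let d := PySem.List.pyGetD diffs 0 0
    some (String.ofList (PySem.List.slice fl none (some d) ++ PySem.List.slice fl (some (d + 1)) none))

-- ===== PRECONDITION & SPEC =====
-- Pre_ excludes exactly the inputs where Python's second_word[i] raises IndexError
-- (second_word shorter than first_word); both A and B raise there.
def Pre_words_similar (first_word : String) (second_word : String) : Prop :=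
  first_word.toList.length ≤ second_word.toList.length
instance (first_word : String) (second_word : String) : Decidable (Pre_words_similar first_word second_word) := by unfold Pre_words_similar; infer_instance
def pvWitness_words_similar : String × String := ("abc", "abd")

def Spec_words_similar (first_word : String) (second_word : String) (out : Option String) : Prop := out = words_similar_alt first_word second_word
instance (first_word : String) (second_word : String) (out : Option String) : Decidable (Spec_words_similar first_word second_word out) := by unfold Spec_words_similar; infer_instance

-- ===== CLAIM (what is proved, stated in full; the proofs are below) =====
def Claim_equal_words_similar : Prop := ∀ (first_word : String) (second_word : String), Dom_words_similar first_word second_word → Pre_words_similar first_word second_word → Spec_words_similar first_word second_word (words_similar first_word second_word)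

-- ===== LEMMAS AND PROOFS =====

lemma map_getD_range' (fl : List Char) (a b : Nat) (h : a + b ≤ fl.length) :
    (List.range' a b).map (fun k => fl.getD k ' ') = (fl.drop a).take b := by
  induction b generalizing a with
  | zero => simp
  | succ b ih =>
    have ha : a < fl.length := by omega
    rw [List.range'_succ, List.map_cons, ih (a + 1) (by omega),
        List.drop_eq_getElem_cons ha, List.take_succ_cons, List.getD_eq_getElem fl ' ' ha]

lemma range_filter_ne (n d : Nat) (hd : d < n) :
    (List.range n).filter (fun k => !(k == d)) = List.range d ++ List.range' (d + 1) (n - d - 1) := by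
  have hsplit : List.range n = List.range' 0 d ++ List.range' d (n - d) := by
    rw [show List.range' d (n - d) = List.range' (0 + 1 * d) (n - d) by ring_nf,
        List.range'_append, List.range_eq_range']
    congr 1; omega
  have h2 : List.range' d (n - d) = d :: List.range' (d + 1) (n - d - 1) := by
    conv_lhs => rw [show n - d = (n - d - 1) + 1 from by omega, List.range'_succ]
  rw [hsplit, h2, List.filter_append, List.filter_cons]
  simp only [beq_self_eq_true, Bool.not_true, Bool.false_eq_true, if_false]
  rw [List.filter_eq_self.mpr, List.filter_eq_self.mpr, ← List.range_eq_range']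
  · intro x hx
    have := (List.mem_range'_1.mp hx).1
    simp; omega
  · intro x hx
    have := List.mem_range'_1.mp hx
    simp; omega

lemma core (fl sl : List Char) :
    (if ((PySem.List.pyRange 0 (fl.length : Int) 1).foldl
        (fun (acc : Int × List Char) i =>
          if PySem.List.pyGetD fl i ' ' != PySem.List.pyGetD sl i ' ' then (acc.1 + 1, acc.2)
          else (acc.1, acc.2 ++ [PySem.List.pyGetD fl i ' '])) ((0 : Int), ([] : List Char))).1 ≠ 1
      then none
      else some (String.ofList ((PySem.List.pyRange 0 (fl.length : Int) 1).foldl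
        (fun (acc : Int × List Char) i =>
          if PySem.List.pyGetD fl i ' ' != PySem.List.pyGetD sl i ' ' then (acc.1 + 1, acc.2)
          else (acc.1, acc.2 ++ [PySem.List.pyGetD fl i ' '])) ((0 : Int), ([] : List Char))).2)) =
    (if ((PySem.List.pyRange 0 (fl.length : Int) 1).filter
        (fun i => PySem.List.pyGetD fl i ' ' != PySem.List.pyGetD sl i ' ')).length ≠ 1
      then none
      else some (String.ofList (PySem.List.slice fl none
          (some (PySem.List.pyGetD ((PySem.List.pyRange 0 (fl.length : Int) 1).filter
            (fun i => PySem.List.pyGetD fl i ' ' != PySem.List.pyGetD sl i ' ')) 0 0)) ++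
        PySem.List.slice fl (some (PySem.List.pyGetD ((PySem.List.pyRange 0 (fl.length : Int) 1).filter
            (fun i => PySem.List.pyGetD fl i ' ' != PySem.List.pyGetD sl i ' ')) 0 0 + 1)) none))) := by
  have hbody : (fun (acc : Int × List Char) (i : Int) =>
      if PySem.List.pyGetD fl i ' ' != PySem.List.pyGetD sl i ' ' then (acc.1 + 1, acc.2)
      else (acc.1, acc.2 ++ [PySem.List.pyGetD fl i ' '])) =
      (fun acc i =>
        ((if PySem.List.pyGetD fl i ' ' != PySem.List.pyGetD sl i ' ' then acc.1 + 1 else acc.1),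
         (if !(PySem.List.pyGetD fl i ' ' != PySem.List.pyGetD sl i ' ') then acc.2 ++ [PySem.List.pyGetD fl i ' '] else acc.2))) := by
    funext acc i
    cases h : (PySem.List.pyGetD fl i ' ' != PySem.List.pyGetD sl i ' ') with
    | false => simp
    | true => simp
  have hR := PySem.List.pyRange_zero_nat fl.length
  rw [hbody,
      PySem.List.foldl_prod_mk
        (f := fun (a : Int) (i : Int) => if PySem.List.pyGetD fl i ' ' != PySem.List.pyGetD sl i ' ' then a + 1 else a)
        (g := fun (a : List Char) (i : Int) => if !(PySem.List.pyGetD fl i ' ' != PySem.List.pyGetD sl i ' ') then a ++ [PySem.List.pyGetD fl i ' '] else a),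
      PySem.List.foldl_if_add_one, PySem.List.foldl_append_if, hR,
      List.countP_map, List.filter_map, List.filter_map]
  simp only [Function.comp_def, PySem.List.pyGetD_natCast, List.nil_append, List.length_map]
  rw [List.countP_eq_length_filter]
  set D := (List.range fl.length).filter (fun k => fl.getD k ' ' != sl.getD k ' ') with hD
  by_cases hc : D.length = 1
  · obtain ⟨dn, hDd⟩ := List.length_eq_one_iff.mp hc
    have hdn : dn < fl.length ∧ (fl.getD dn ' ' != sl.getD dn ' ') = true := by
      have : dn ∈ D := by rw [hDd]; exact List.mem_singleton_self dn
      have := List.mem_filter.mp this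
      exact ⟨List.mem_range.mp this.1, this.2⟩
    have honly : ∀ k, k < fl.length → (fl.getD k ' ' != sl.getD k ' ') = true → k = dn := by
      intro k hk hpk
      have : k ∈ D := List.mem_filter.mpr ⟨List.mem_range.mpr hk, hpk⟩
      rw [hDd] at this; simpa using this
    rw [if_neg (by simp [hc]), if_neg (by simp [hc]), hDd]
    simp only [List.map_cons, List.map_nil, PySem.List.pyGetD_zero_cons]
    rw [PySem.List.slice_to_natCast,
        show ((dn : Int) + 1) = ((dn + 1 : Nat) : Int) by push_cast; ring,
        PySem.List.slice_from_natCast]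
    congr 1
    apply congrArg
    have hcongr : (List.range fl.length).filter (fun k => !(fl.getD k ' ' != sl.getD k ' ')) =
        (List.range fl.length).filter (fun k => !(k == dn)) := by
      apply List.filter_congr
      intro k hk
      have hk' := List.mem_range.mp hk
      by_cases hkd : k = dn
      · subst hkd; rw [hdn.2, beq_self_eq_true]
      · have hne : (fl.getD k ' ' != sl.getD k ' ') = false := by
          cases h : (fl.getD k ' ' != sl.getD k ' ') with
          | false => rfl
          | true => exact absurd (honly k hk' h) hkd
        rw [hne, show (k == dn) = false from by simp [hkd]]
    rw [hcongr, range_filter_ne fl.length dn hdn.1, List.map_append,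
        show List.range dn = List.range' 0 dn from List.range_eq_range' .. ]
    simp only [List.map_append, List.map_map, Function.comp_def, PySem.List.pyGetD_natCast]
    rw [map_getD_range' fl 0 dn (by omega), map_getD_range' fl (dn+1) (fl.length - dn - 1) (by omega),
        List.drop_zero]
    congr 1
    apply List.take_of_length_le
    rw [List.length_drop]
    omega
  · rw [if_pos, if_pos hc]
    intro h
    apply hc
    omega

-- ===== VERDICT (by name: the statement is the Claim_ definition above) =====
theorem words_similar_spec : Claim_equal_words_similar := by
  intro f s _ _
  show words_similar f s = words_similar_alt f s
  simp only [words_similar, words_similar_alt]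
  exact core f.toList s.toList
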